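-- pv_equiv track=rewrite | github.com/GayanRuchiranga/ChemGuide | Chem_Guide_BackEnd/Conversions_Backup.py | build_molecule
-- ===== SOURCE A (Python) =====
-- def build_molecule(input):
--     chloride = []
--     molecule = ""
--     if input == 1:
--         return "CH3"
--     else:
--         count = input - 1
--         chloride.append("CH3")
--         for i in range(count):
--             chloride.append("CH2")
--     molecule = "".join(chloride)
--     return molecule
-- ===== SOURCE B (Python) =====
-- def build_molecule(input):
--     return "CH3" + "CH2" * (input - 1)
-- ===== Notes on version B (the rewrite author's own statement) =====
-- stated objective: simpler
-- what changed: Replaced the accumulator list built by a range loop and then joined with a single closed-form expression using Python string repetition.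
import Mathlib
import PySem

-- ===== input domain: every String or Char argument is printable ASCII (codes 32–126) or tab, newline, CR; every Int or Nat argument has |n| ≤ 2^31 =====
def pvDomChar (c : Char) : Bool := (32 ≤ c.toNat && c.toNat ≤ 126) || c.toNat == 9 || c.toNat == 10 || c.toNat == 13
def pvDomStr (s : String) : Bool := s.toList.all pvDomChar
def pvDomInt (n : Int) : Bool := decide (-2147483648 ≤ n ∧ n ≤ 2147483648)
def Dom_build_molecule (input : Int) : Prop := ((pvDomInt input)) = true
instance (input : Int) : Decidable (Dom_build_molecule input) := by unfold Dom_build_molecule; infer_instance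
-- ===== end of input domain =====

-- B replaces A's append-in-a-range-loop-then-join with one closed-form string-repetition expression (simpler).

-- ===== PORT A =====
def build_molecule (input : Int) : String :=
  if input == 1 then "CH3"
  else
    let count := input - 1
    let chloride : List String :=
      (PySem.List.pyRange 0 count 1).foldl (fun acc _ => acc ++ ["CH2"]) ["CH3"]
    PySem.Str.join "" chloride

-- ===== PORT B =====
-- Python's `s * n` (empty for n ≤ 0) ported by hand as join of n replicas — exact for int n.
def pyStrMul (s : String) (n : Int) : String :=
  PySem.Str.join "" (List.replicate n.toNat s)

def build_molecule_alt (input : Int) : String :=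
  "CH3" ++ pyStrMul "CH2" (input - 1)

-- ===== PRECONDITION & SPEC =====
def Spec_build_molecule (input : Int) (out : String) : Prop := out = build_molecule_alt input
instance (input : Int) (out : String) : Decidable (Spec_build_molecule input out) := by unfold Spec_build_molecule; infer_instance

-- ===== CLAIM (what is proved, stated in full; the proofs are below) =====
def Claim_equal_build_molecule : Prop := ∀ (input : Int), Dom_build_molecule input → Spec_build_molecule input (build_molecule input)

-- ===== LEMMAS AND PROOFS =====
theorem join_empty_sep (l : List (List Char)) : PySem.Chars.join [] l = l.flatten := by
  induction l with
  | nil => simp [PySem.Chars.join_nil]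
  | cons a t ih =>
    cases t with
    | nil => simp [PySem.Chars.join_singleton]
    | cons b r => simp [PySem.Chars.join_cons_cons] at ih ⊢; simpa using ih

-- ===== VERDICT (by name: the statement is the Claim_ definition above) =====
theorem build_molecule_spec : Claim_equal_build_molecule := by
  intro input _
  unfold Spec_build_molecule build_molecule build_molecule_alt pyStrMul
  by_cases h : input = 1
  · subst h; decide
  · simp only [beq_iff_eq, h, if_false]
    apply String.toList_inj.mp
    rw [PySem.List.foldl_append_singleton_eq_map (fun _ => "CH2")]
    simp [PySem.Str.toList_join, join_empty_sep, List.map_const',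
      PySem.List.length_pyRange_one, String.toList_append]
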